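-- pv_equiv track=rewrite | github.com/mindmemory-ai/pinn_diffusion_trotter_suzuki | src/pinn_trotter/data/sampling.py | _detect_commuting_groups
-- ===== SOURCE A (Python) =====
-- def _detect_commuting_groups(pauli_strings: list[str]) -> list[list[int]]:
--     """Partition Pauli terms into maximally commuting groups using a greedy graph colouring.
--
--     Two Pauli strings P and Q commute iff the number of positions where they differ
--     (both non-identity but different) is even.
--     """
--     n = len(pauli_strings)
--
--     def commutes(p: str, q: str) -> bool:
--         anticommute_count = sum(
--             1 for a, b in zip(p, q)
--             if a != 'I' and b != 'I' and a != b
--         )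
--         return anticommute_count % 2 == 0
--
--     # Build adjacency (two terms are in conflict = anticommute → different groups)
--     groups: list[list[int]] = []
--     term_group: list[int] = [-1] * n
--
--     for i in range(n):
--         placed = False
--         for g_idx, group in enumerate(groups):
--             if all(commutes(pauli_strings[i], pauli_strings[j]) for j in group):
--                 group.append(i)
--                 term_group[i] = g_idx
--                 placed = True
--                 break
--         if not placed:
--             term_group[i] = len(groups)
--             groups.append([i])
--
--     return groups
-- ===== SOURCE B (Python) =====
-- def _detect_commuting_groups(pauli_strings: list[str]) -> list[list[int]]:
--     n = len(pauli_strings)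
--
--     # Sparse encoding: for each string, a dict position -> letter over its non-identity support.
--     supports = []
--     for s in pauli_strings:
--         d = {}
--         for pos, ch in enumerate(s):
--             if ch != 'I':
--                 d[pos] = ch
--         supports.append(d)
--
--     # Full n x n commutation table, computed once from the sparse encodings.
--     commute = []
--     for i in range(n):
--         row = []
--         di = supports[i]
--         for j in range(n):
--             dj = supports[j]
--             parity = False
--             for pos, ch in di.items():
--                 other = dj.get(pos)
--                 if other is not None and other != ch:
--                     parity = not parity
--             row.append(not parity)
--         commute.append(row)
--
--     # Greedy first-fit colouring as pure table lookups.
--     groups = []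
--     for i in range(n):
--         for group in groups:
--             if all(commute[i][j] for j in group):
--                 group.append(i)
--                 break
--         else:
--             groups.append([i])
--     return groups
-- ===== Notes on version B (the rewrite author's own statement) =====
-- stated objective: alternative
-- what changed: B first encodes each Pauli string sparsely (position->letter dict over its non-identity support), precomputes the full n x n commutation table by a parity toggle over the sparse supports, and then runs the greedy first-fit pass as pure table lookups; A recomputes commutes() by zipping full strings inside the colouring loop.
import Mathlib
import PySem

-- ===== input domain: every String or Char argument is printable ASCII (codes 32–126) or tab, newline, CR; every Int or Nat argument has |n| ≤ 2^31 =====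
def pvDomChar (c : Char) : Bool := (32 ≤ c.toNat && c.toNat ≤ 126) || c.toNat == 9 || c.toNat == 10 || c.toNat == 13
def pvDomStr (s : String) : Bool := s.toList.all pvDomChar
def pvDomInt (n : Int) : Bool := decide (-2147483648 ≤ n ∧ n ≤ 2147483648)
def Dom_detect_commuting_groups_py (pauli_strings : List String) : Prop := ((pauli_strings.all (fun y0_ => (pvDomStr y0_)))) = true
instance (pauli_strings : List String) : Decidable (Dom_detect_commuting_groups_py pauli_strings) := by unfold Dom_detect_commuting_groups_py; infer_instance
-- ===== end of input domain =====

-- B replaces A's in-loop string zipping by a sparse support encoding (position -> letter dict)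
-- plus a precomputed n×n commutation table; alternative decomposition, same greedy result.

-- ===== PORT A =====
-- commutes(p, q): sum of anticommuting positions over zip(p, q), then parity test
def pyCommutes (p q : String) : Bool :=
  ((p.toList.zip q.toList).foldl
      (fun acc ab => if ab.1 != 'I' && ab.2 != 'I' && ab.1 != ab.2 then acc + 1 else acc)
      (0 : Int)) % 2 == 0

-- the inner 'for g_idx, group in enumerate(groups): … break' search of A's colouring loop
def placeLoopA (ps : List String) (i : Int) (gidx : Int) :
    List (List Int) → Option (List (List Int) × Int)
  | [] => none
  | g :: rest =>
    if g.all (fun j => pyCommutes (PySem.List.pyGetD ps i "") (PySem.List.pyGetD ps j "")) then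
      some ((g ++ [i]) :: rest, gidx)
    else
      match placeLoopA ps i (gidx + 1) rest with
      | some (rest', k) => some (g :: rest', k)
      | none => none

-- one iteration of A's 'for i in range(n)' loop over the state (groups, term_group)
def stepA (ps : List String) (st : List (List Int) × List Int) (i : Int) :
    List (List Int) × List Int :=
  match placeLoopA ps i 0 st.1 with
  | some (groups', gidx) => (groups', st.2.set i.toNat gidx)
  | none => (st.1 ++ [[i]], st.2.set i.toNat (st.1.length : Int))

def detect_commuting_groups_py (pauli_strings : List String) : List (List Int) :=
  ((PySem.List.pyRange 0 (pauli_strings.length : Int) 1).foldl (stepA pauli_strings)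
      ([], List.replicate pauli_strings.length (-1))).1

-- ===== PORT B =====
-- sparse support of one string: dict position -> letter over the non-identity positions
def supportDictB (cs : List Char) : PySem.Dict Int Char :=
  (PySem.List.enumerate cs 0).foldl
    (fun d pc => if pc.2 != 'I' then d.insert pc.1 pc.2 else d) PySem.Dict.empty

-- one commutation-table entry: parity toggle over di's support, looked up in dj
def rowEntryB (di dj : PySem.Dict Int Char) : Bool :=
  !(di.items.foldl
      (fun par pc =>
        match dj.get? pc.1 with
        | some other => if other != pc.2 then !par else par
        | none => par)
      false)

-- B's greedy placement: 'for group in groups: … break / else: append' as table lookups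
def placeLoopB (row : List Bool) (i : Int) : List (List Int) → List (List Int)
  | [] => [[i]]
  | g :: rest =>
    if g.all (fun j => PySem.List.pyGetD row j false) then (g ++ [i]) :: rest
    else g :: placeLoopB row i rest

def detect_commuting_groups_py_alt (pauli_strings : List String) : List (List Int) :=
  let n : Int := pauli_strings.length
  let supports : List (PySem.Dict Int Char) :=
    pauli_strings.map (fun s => supportDictB s.toList)
  let commute : List (List Bool) :=
    (PySem.List.pyRange 0 n 1).map (fun i =>
      (PySem.List.pyRange 0 n 1).map (fun j =>
        rowEntryB (PySem.List.pyGetD supports i PySem.Dict.empty)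
                  (PySem.List.pyGetD supports j PySem.Dict.empty)))
  (PySem.List.pyRange 0 n 1).foldl
    (fun groups i => placeLoopB (PySem.List.pyGetD commute i []) i groups) []

-- ===== PRECONDITION & SPEC =====
def Spec_detect_commuting_groups_py (pauli_strings : List String) (out : List (List Int)) : Prop := out = detect_commuting_groups_py_alt pauli_strings
instance (pauli_strings : List String) (out : List (List Int)) : Decidable (Spec_detect_commuting_groups_py pauli_strings out) := by unfold Spec_detect_commuting_groups_py; infer_instance

-- ===== CLAIM (what is proved, stated in full; the proofs are below) =====
def Claim_equal_detect_commuting_groups_py : Prop := ∀ (pauli_strings : List String), Dom_detect_commuting_groups_py pauli_strings → Spec_detect_commuting_groups_py pauli_strings (detect_commuting_groups_py pauli_strings)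

-- ===== LEMMAS AND PROOFS =====

-- the keys of the filtered enumeration are distinct positions
lemma enumFilter_fst_nodup (cs : List Char) :
    (((PySem.List.enumerate cs 0).filter (fun pc => pc.2 != 'I')).map (fun pc => pc.1)).Nodup := by
  have hsub : (((PySem.List.enumerate cs 0).filter (fun pc => pc.2 != 'I')).map (fun pc => pc.1)).Sublist
      ((PySem.List.enumerate cs 0).map (fun pc => pc.1)) :=
    List.Sublist.map _ List.filter_sublist
  rw [PySem.List.map_fst_enumerate] at hsub
  exact List.Nodup.sublist hsub (PySem.List.nodup_pyRange_one _ _)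

lemma supportDictB_items (cs : List Char) :
    (supportDictB cs).items = (PySem.List.enumerate cs 0).filter (fun pc => pc.2 != 'I') := by
  unfold supportDictB
  rw [← List.foldl_filter (p := fun pc : Int × Char => pc.2 != 'I')
    (f := fun (d : PySem.Dict Int Char) (pc : Int × Char) => d.insert pc.1 pc.2)]
  rw [PySem.Dict.items_foldl_insert_fresh
      ((PySem.List.enumerate cs 0).filter (fun pc => pc.2 != 'I'))
      (fun pc => pc.1) (fun pc => pc.2) PySem.Dict.empty
      (by intro a _; simp) (enumFilter_fst_nodup cs)]
  simp [PySem.Dict.empty]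

lemma supportDictB_keys_nodup (cs : List Char) : (supportDictB cs).keys.Nodup := by
  have h : (supportDictB cs).keys
      = ((PySem.List.enumerate cs 0).filter (fun pc => pc.2 != 'I')).map (fun pc => pc.1) := by
    simp only [PySem.Dict.keys, supportDictB_items]
  rw [h]; exact enumFilter_fst_nodup cs

-- in-range lookup in the support dict reads the character of the string
lemma supportDictB_get?_in (cs : List Char) (j : Int) (h0 : 0 ≤ j) (h1 : j < (cs.length : Int)) :
    (supportDictB cs).get? j =
      if PySem.List.pyGetD cs j 'I' != 'I' then some (PySem.List.pyGetD cs j 'I') else none := by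
  have hnd := supportDictB_keys_nodup cs
  have hget := PySem.List.pyGetD_eq_getElem cs (i := j) 'I' h0 h1
  by_cases hc : cs[j.toNat] = 'I'
  · rw [hget]
    simp only [hc, bne_self_eq_false, Bool.false_eq_true, if_false]
    cases hopt : (supportDictB cs).get? j with
    | none => rfl
    | some v =>
      exfalso
      rw [PySem.Dict.get?_eq_some_iff_mem_items _ _ _ hnd, supportDictB_items,
        List.mem_filter, PySem.List.mem_enumerate_iff] at hopt
      obtain ⟨⟨k, hk, hek⟩, hv⟩ := hopt
      have hj : j = (k : Int) := by simpa using congrArg Prod.fst hek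
      have hv2 : v = cs[k] := by simpa using congrArg Prod.snd hek
      have : k = j.toNat := by omega
      subst this
      rw [hv2] at hv; rw [hc] at hv; simp at hv
  · rw [hget]
    simp only [bne_iff_ne, ne_eq, hc, not_false_eq_true, if_pos]
    rw [PySem.Dict.get?_eq_some_iff_mem_items _ _ _ hnd, supportDictB_items, List.mem_filter,
      PySem.List.mem_enumerate_iff]
    refine ⟨⟨j.toNat, by omega, by simp; omega⟩, by simpa using hc⟩

lemma supportDictB_get?_out (cs : List Char) (j : Int) (h : (cs.length : Int) ≤ j) :
    (supportDictB cs).get? j = none := by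
  have hnd := supportDictB_keys_nodup cs
  cases hopt : (supportDictB cs).get? j with
  | none => rfl
  | some v =>
    exfalso
    rw [PySem.Dict.get?_eq_some_iff_mem_items _ _ _ hnd, supportDictB_items,
      List.mem_filter, PySem.List.mem_enumerate_iff] at hopt
    obtain ⟨⟨k, hk, hek⟩, -⟩ := hopt
    have hj : j = (k : Int) := by simpa using congrArg Prod.fst hek
    omega

-- a toggle loop computes the parity of a count
lemma foldl_toggle {α : Type} (P : α → Bool) (l : List α) (b : Bool) :
    l.foldl (fun par x => if P x then !par else par) b
      = (b != decide (l.countP P % 2 = 1)) := by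
  induction l generalizing b with
  | nil => simp
  | cons x l ih =>
    rw [List.foldl_cons, ih, List.countP_cons]
    by_cases h : P x = true <;>
      rcases Nat.mod_two_eq_zero_or_one (List.countP P l) with hp | hp <;>
      simp [h, Nat.add_mod, hp]

lemma rowEntryB_eq (di dj : PySem.Dict Int Char) :
    rowEntryB di dj
      = !(decide (di.items.countP
          (fun pc => match dj.get? pc.1 with | some o => o != pc.2 | none => false) % 2 = 1)) := by
  unfold rowEntryB
  have hfun : (fun (par : Bool) (pc : Int × Char) =>
      match dj.get? pc.1 with
      | some other => if other != pc.2 then !par else par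
      | none => par)
      = fun par pc =>
          if (match dj.get? pc.1 with | some o => o != pc.2 | none => false) then !par else par := by
    funext par pc
    cases h : dj.get? pc.1 with
    | none => simp
    | some o => by_cases ho : (o != pc.2) = true <;> simp [ho]
  rw [hfun, foldl_toggle]
  simp

lemma zip_eq_map_pyRange (p q : List Char) :
    p.zip q = (PySem.List.pyRange 0 ((min p.length q.length : Nat) : Int) 1).map
        (fun j => (PySem.List.pyGetD p j 'I', PySem.List.pyGetD q j 'I')) := by
  apply List.ext_getElem
  · simp [PySem.List.length_pyRange_one]; omega
  · intro k h1 h2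
    have hk : k < min p.length q.length := by simpa using h1
    simp only [List.getElem_map, PySem.List.getElem_pyRange_one, List.getElem_zip, zero_add]
    rw [PySem.List.pyGetD_natCast, PySem.List.pyGetD_natCast]
    rw [List.getD_eq_getElem _ _ (by omega), List.getD_eq_getElem _ _ (by omega)]

-- the B-side parity count equals the A-side zip count
lemma countB_eq (p q : List Char) :
    (supportDictB p).items.countP
        (fun pc => match (supportDictB q).get? pc.1 with | some o => o != pc.2 | none => false)
      = (p.zip q).countP (fun ab => ab.1 != 'I' && ab.2 != 'I' && ab.1 != ab.2) := by
  rw [supportDictB_items, List.countP_filter]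
  rw [PySem.List.enumerate_eq_map_pyRange p 'I', List.countP_map]
  rw [zip_eq_map_pyRange, List.countP_map]
  have hm : ((min p.length q.length : Nat) : Int) ≤ (p.length : Int) := by
    simp
  rw [show PySem.List.pyRange 0 (PySem.List.len p) 1
      = PySem.List.pyRange 0 ((min p.length q.length : Nat) : Int) 1
        ++ PySem.List.pyRange ((min p.length q.length : Nat) : Int) (PySem.List.len p) 1 from
    PySem.List.pyRange_one_append _ _ _ (by positivity) (by simp [PySem.List.len])]
  rw [List.countP_append]
  simp only [Function.comp_def]
  have h2 : List.countP
      (fun j => ((match (supportDictB q).get? j with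
          | some o => o != PySem.List.pyGetD p j 'I'
          | none => false) && (PySem.List.pyGetD p j 'I' != 'I')))
      (PySem.List.pyRange ((min p.length q.length : Nat) : Int) (PySem.List.len p) 1) = 0 := by
    rw [List.countP_eq_zero]
    intro j hj
    rw [PySem.List.mem_pyRange_one] at hj
    have hq : (q.length : Int) ≤ j := by
      simp [PySem.List.len] at hj; omega
    simp [supportDictB_get?_out q j hq]
  rw [h2, Nat.add_zero]
  apply List.countP_congr
  intro j hj
  rw [PySem.List.mem_pyRange_one] at hj
  obtain ⟨hj0, hjm⟩ := hj
  have hjq : j < (q.length : Int) := by simp at hjm; omega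
  rw [supportDictB_get?_in q j hj0 hjq]
  by_cases hq : PySem.List.pyGetD q j 'I' = 'I'
  · simp [hq]
  · simp only [hq, bne_iff_ne, ne_eq, not_false_eq_true, if_pos]
    by_cases hp : PySem.List.pyGetD p j 'I' = 'I'
    · simp [hp]
    · by_cases hpq : PySem.List.pyGetD p j 'I' = PySem.List.pyGetD q j 'I' <;>
        simp [hp, hq, hpq] <;> tauto

-- B's table entry IS A's commutes() on the same two strings
lemma commutes_eq (s t : String) :
    rowEntryB (supportDictB s.toList) (supportDictB t.toList) = pyCommutes s t := by
  rw [rowEntryB_eq, countB_eq]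
  unfold pyCommutes
  rw [PySem.List.foldl_count_if]
  rw [← decide_not]
  generalize List.countP (fun ab => ab.1 != 'I' && ab.2 != 'I' && ab.1 != ab.2) (s.toList.zip t.toList) = n
  have h2 : ((0:Int) + (n:Int)) % 2 = ((n % 2 : Nat) : Int) := by omega
  rw [h2]
  rcases Nat.mod_two_eq_zero_or_one n with h | h <;> simp [h]

-- placement only ever stores i or indices already stored
lemma placeLoopB_bound (row : List Bool) (i : Int) (groups : List (List Int)) (P : Int → Prop)
    (hi : P i) (hg : ∀ g ∈ groups, ∀ j ∈ g, P j) :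
    ∀ g ∈ placeLoopB row i groups, ∀ j ∈ g, P j := by
  induction groups with
  | nil =>
    intro g hgm j hj
    simp [placeLoopB] at hgm
    subst hgm; simp at hj; subst hj; exact hi
  | cons g0 rest ih =>
    intro g hgm j hj
    rw [placeLoopB] at hgm
    by_cases hc : g0.all (fun j => PySem.List.pyGetD row j false) = true
    · rw [if_pos hc] at hgm
      rcases List.mem_cons.mp hgm with h | h
      · subst h
        rcases List.mem_append.mp hj with h' | h'
        · exact hg g0 (by simp) j h'
        · simp at h'; subst h'; exact hi
      · exact hg g (by simp [h]) j hj
    · rw [if_neg hc] at hgm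
      rcases List.mem_cons.mp hgm with h | h
      · subst h; exact hg g (by simp) j hj
      · exact ih (fun g' hg' => hg g' (by simp [hg'])) g h j hj

-- when the table row agrees with commutes(), B's for-else places i exactly where A does
lemma placeLoop_agree (row : List Bool) (ps : List String) (i : Int) (groups : List (List Int))
    (gidx : Int)
    (hag : ∀ g ∈ groups, ∀ j ∈ g,
      PySem.List.pyGetD row j false
        = pyCommutes (PySem.List.pyGetD ps i "") (PySem.List.pyGetD ps j "")) :
    placeLoopB row i groups
      = (match placeLoopA ps i gidx groups with
          | some (gs, _) => gs
          | none => groups ++ [[i]]) := by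
  induction groups generalizing gidx with
  | nil => simp [placeLoopA, placeLoopB]
  | cons g0 rest ih =>
    rw [placeLoopA, placeLoopB]
    have hcond : (g0.all (fun j => PySem.List.pyGetD row j false))
        = g0.all (fun j => pyCommutes (PySem.List.pyGetD ps i "") (PySem.List.pyGetD ps j "")) := by
      apply Bool.eq_iff_iff.mpr
      simp only [List.all_eq_true]
      constructor <;> intro h j hj
      · rw [← hag g0 (by simp) j hj]; exact h j hj
      · rw [hag g0 (by simp) j hj]; exact h j hj
    rw [hcond]
    by_cases hc : g0.all (fun j => pyCommutes (PySem.List.pyGetD ps i "") (PySem.List.pyGetD ps j "")) = true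
    · rw [if_pos hc, if_pos hc]
    · rw [if_neg hc, if_neg hc]
      rw [ih (gidx + 1) (fun g' hg' => hag g' (by simp [hg']))]
      cases placeLoopA ps i (gidx + 1) rest with
      | none => simp
      | some r => rcases r with ⟨rest', k⟩; simp

lemma pyGetD_map_pyRange_fun {α : Type} (f : Int → α) (n i : Int) (d : α)
    (h0 : 0 ≤ i) (h1 : i < n) :
    PySem.List.pyGetD ((PySem.List.pyRange 0 n 1).map f) i d = f i := by
  have hlen : i < (((PySem.List.pyRange 0 n 1).map f).length : Int) := by
    simp only [List.length_map, PySem.List.length_pyRange_one]; omega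
  rw [PySem.List.pyGetD_eq_getElem _ d h0 hlen]
  rw [List.getElem_map]
  rw [PySem.List.getElem_pyRange_one]
  congr 1
  omega

-- the two colouring loops stay in lock step (A's term_group is dead state)
lemma fold_steps (ps : List String) (commute : List (List Bool)) (l : List Int)
    (groups : List (List Int)) (tg : List Int)
    (hl : ∀ i ∈ l, 0 ≤ i ∧ i < (ps.length : Int))
    (hg : ∀ g ∈ groups, ∀ j ∈ g, 0 ≤ j ∧ j < (ps.length : Int))
    (hco : ∀ i j, 0 ≤ i → i < (ps.length : Int) → 0 ≤ j → j < (ps.length : Int) →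
      PySem.List.pyGetD (PySem.List.pyGetD commute i []) j false
        = pyCommutes (PySem.List.pyGetD ps i "") (PySem.List.pyGetD ps j "")) :
    (l.foldl (stepA ps) (groups, tg)).1
      = l.foldl (fun gs i => placeLoopB (PySem.List.pyGetD commute i []) i gs) groups := by
  induction l generalizing groups tg with
  | nil => simp
  | cons i l ih =>
    rw [List.foldl_cons, List.foldl_cons]
    obtain ⟨hi0, hin⟩ := hl i (by simp)
    have hrow : ∀ g ∈ groups, ∀ j ∈ g,
        PySem.List.pyGetD (PySem.List.pyGetD commute i []) j false
          = pyCommutes (PySem.List.pyGetD ps i "") (PySem.List.pyGetD ps j "") := by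
      intro g hgm j hj
      obtain ⟨hj0, hjn⟩ := hg g hgm j hj
      exact hco i j hi0 hin hj0 hjn
    have hplace := placeLoop_agree (PySem.List.pyGetD commute i []) ps i groups 0 hrow
    have hstep : (stepA ps (groups, tg) i).1 = placeLoopB (PySem.List.pyGetD commute i []) i groups := by
      rw [hplace]
      unfold stepA
      cases placeLoopA ps i 0 (groups, tg).1 with
      | none => simp
      | some r => rcases r with ⟨gs, k⟩; simp
    have hnext : ∀ g ∈ placeLoopB (PySem.List.pyGetD commute i []) i groups, ∀ j ∈ g,
        0 ≤ j ∧ j < (ps.length : Int) :=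
      placeLoopB_bound _ i groups _ ⟨hi0, hin⟩ hg
    have := ih (placeLoopB (PySem.List.pyGetD commute i []) i groups) (stepA ps (groups, tg) i).2
      (fun j hj => hl j (by simp [hj])) hnext
    rw [← this]
    congr 1
    rcases hsa : stepA ps (groups, tg) i with ⟨gs', tg'⟩
    have : gs' = placeLoopB (PySem.List.pyGetD commute i []) i groups := by
      rw [← hstep, hsa]
    simp [this]

-- ===== VERDICT (by name: the statement is the Claim_ definition above) =====
theorem detect_commuting_groups_py_spec : Claim_equal_detect_commuting_groups_py := by
  intro ps _
  unfold Spec_detect_commuting_groups_py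
  unfold detect_commuting_groups_py detect_commuting_groups_py_alt
  show (((PySem.List.pyRange 0 (ps.length : Int) 1).foldl (stepA ps)
      ([], List.replicate ps.length (-1))).1)
    = (PySem.List.pyRange 0 (ps.length : Int) 1).foldl
        (fun groups i => placeLoopB (PySem.List.pyGetD
          ((PySem.List.pyRange 0 (ps.length : Int) 1).map (fun i =>
            (PySem.List.pyRange 0 (ps.length : Int) 1).map (fun j =>
              rowEntryB
                (PySem.List.pyGetD (ps.map (fun s => supportDictB s.toList)) i PySem.Dict.empty)
                (PySem.List.pyGetD (ps.map (fun s => supportDictB s.toList)) j PySem.Dict.empty))))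
          i []) i groups) []
  apply fold_steps
  · intro i hi
    rw [PySem.List.mem_pyRange_one] at hi
    exact hi
  · intro g hg; simp at hg
  · intro i j hi0 hin hj0 hjn
    rw [pyGetD_map_pyRange_fun _ _ _ _ hi0 hin]
    rw [pyGetD_map_pyRange_fun _ _ _ _ hj0 hjn]
    have hempty : (PySem.Dict.empty : PySem.Dict Int Char) = supportDictB ("" : String).toList := rfl
    rw [hempty]
    rw [PySem.List.pyGetD_map (fun s => supportDictB s.toList) ps i ""]
    rw [PySem.List.pyGetD_map (fun s => supportDictB s.toList) ps j ""]
    exact commutes_eq _ _
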